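-- pv_equiv track=rewrite | github.com/RatJuggler/advent-of-code | 2019/day10/advent10.py | detect_asteroids
-- ===== SOURCE A (Python) =====
-- def obscures_asteroid(a, b, c):
--     cross_product = (c[1] - a[1]) * (b[0] - a[0]) - (c[0] - a[0]) * (b[1] - a[1])
--     if cross_product != 0:
--         return False
--     dot_product = (c[0] - a[0]) * (b[0] - a[0]) + (c[1] - a[1]) * (b[1] - a[1])
--     if dot_product < 0:
--         return False
--     squared_length_ba = (b[0] - a[0]) * (b[0] - a[0]) + (b[1] - a[1]) * (b[1] - a[1])
--     if dot_product > squared_length_ba: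
--         return False
--     return True
--
-- def can_see_asteroid(from_base, asteroid, other_asteroids):
--     for other_asteroid in other_asteroids:
--         if other_asteroid == from_base or other_asteroid == asteroid:
--             continue
--         if obscures_asteroid(from_base, asteroid, other_asteroid):
--             return False
--     return True
--
-- def detect_asteroids(asteroid_coords, from_base):
--     detected = 0
--     for asteroid in asteroid_coords:
--         if asteroid == from_base:
--             continue
--         if can_see_asteroid(from_base, asteroid, asteroid_coords):
--             detected += 1
--     return detected
-- ===== SOURCE B (Python) =====
-- def _gcd(a, b):
--     if b == 0:
--         return a
--     return _gcd(b, a % b)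
--
-- def detect_asteroids(asteroid_coords, from_base):
--     # One pass builds a dict: reduced direction -> minimal squared distance;
--     # an asteroid is visible iff it sits at that minimal distance in its direction.
--     best = {}
--     for p in asteroid_coords:
--         dx = p[0] - from_base[0]
--         dy = p[1] - from_base[1]
--         if dx == 0 and dy == 0:
--             continue
--         g = _gcd(abs(dx), abs(dy))
--         d = (dx // g, dy // g)
--         r = dx * dx + dy * dy
--         if d not in best or r < best[d]:
--             best[d] = r
--     detected = 0
--     for p in asteroid_coords:
--         dx = p[0] - from_base[0]
--         dy = p[1] - from_base[1]
--         if dx == 0 and dy == 0: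
--             continue
--         g = _gcd(abs(dx), abs(dy))
--         if best[(dx // g, dy // g)] == dx * dx + dy * dy:
--             detected += 1
--     return detected
-- ===== Notes on version B (the rewrite author's own statement) =====
-- stated objective: faster
-- what changed: Replaces the O(n^2) per-asteroid blocking scan by two linear passes over a dict keyed by the gcd-reduced direction from the base, keeping the minimal squared distance per direction; an asteroid is visible iff it attains that minimum.
import Mathlib
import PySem

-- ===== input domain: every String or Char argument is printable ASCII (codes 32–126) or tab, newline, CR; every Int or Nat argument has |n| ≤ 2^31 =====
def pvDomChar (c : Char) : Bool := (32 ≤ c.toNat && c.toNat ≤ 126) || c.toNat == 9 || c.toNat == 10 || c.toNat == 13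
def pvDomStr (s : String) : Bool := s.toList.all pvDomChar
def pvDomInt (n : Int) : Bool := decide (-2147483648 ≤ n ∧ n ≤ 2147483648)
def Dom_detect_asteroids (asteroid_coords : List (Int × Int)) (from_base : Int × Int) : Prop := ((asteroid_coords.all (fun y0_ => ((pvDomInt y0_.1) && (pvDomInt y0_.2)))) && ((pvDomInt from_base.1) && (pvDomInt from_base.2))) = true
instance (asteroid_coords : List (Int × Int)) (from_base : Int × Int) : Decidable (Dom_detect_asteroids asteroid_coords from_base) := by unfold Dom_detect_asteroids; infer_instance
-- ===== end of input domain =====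

-- B replaces A's quadratic per-asteroid blocking scan by two linear passes over a dict of
-- gcd-reduced directions from the base keeping the minimal squared distance per direction.


-- ===== PORT A =====
def obscures_asteroid (a b c : Int × Int) : Bool :=
  let cross_product := (c.2 - a.2) * (b.1 - a.1) - (c.1 - a.1) * (b.2 - a.2)
  if cross_product ≠ 0 then false
  else
    let dot_product := (c.1 - a.1) * (b.1 - a.1) + (c.2 - a.2) * (b.2 - a.2)
    if dot_product < 0 then false
    else
      let squared_length_ba := (b.1 - a.1) * (b.1 - a.1) + (b.2 - a.2) * (b.2 - a.2)
      if dot_product > squared_length_ba then false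
      else true

def can_see_asteroid (from_base asteroid : Int × Int) (other_asteroids : List (Int × Int)) : Bool :=
  other_asteroids.all (fun other_asteroid =>
    if other_asteroid = from_base ∨ other_asteroid = asteroid then true
    else !(obscures_asteroid from_base asteroid other_asteroid))

def detect_asteroids (asteroid_coords : List (Int × Int)) (from_base : Int × Int) : Int :=
  asteroid_coords.foldl (fun detected asteroid =>
    if asteroid = from_base then detected
    else if can_see_asteroid from_base asteroid asteroid_coords then detected + 1
    else detected) 0

-- ===== PORT B =====
-- Source B's recursive Euclid (_gcd); Python % via PySem.Int.mod, measure |b|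
def pyGcd (a b : Int) : Int :=
  if b = 0 then a
  else pyGcd b (PySem.Int.mod a b)
termination_by b.natAbs
decreasing_by
  rename_i h
  rcases lt_or_gt_of_ne h with hb | hb
  · have := PySem.Int.mod_neg_bounds a hb; omega
  · have h1 := PySem.Int.mod_nonneg a hb; have h2 := PySem.Int.mod_lt a hb; omega

-- first pass of Source B: reduced direction ↦ minimal squared distance so far
def bestStep (from_base : Int × Int) (best : PySem.Dict (Int × Int) Int) (p : Int × Int) :
    PySem.Dict (Int × Int) Int :=
  let dx := p.1 - from_base.1
  let dy := p.2 - from_base.2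
  if dx = 0 ∧ dy = 0 then best
  else
    let g := pyGcd |dx| |dy|
    let d := (PySem.Int.floordiv dx g, PySem.Int.floordiv dy g)
    let r := dx * dx + dy * dy
    match best.get? d with
    | none => best.insert d r
    | some m => if r < m then best.insert d r else best

def detect_asteroids_alt (asteroid_coords : List (Int × Int)) (from_base : Int × Int) : Int :=
  let best := asteroid_coords.foldl (bestStep from_base) PySem.Dict.empty
  asteroid_coords.foldl (fun detected p =>
    let dx := p.1 - from_base.1
    let dy := p.2 - from_base.2
    if dx = 0 ∧ dy = 0 then detected
    else
      let g := pyGcd |dx| |dy|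
      match best.get? (PySem.Int.floordiv dx g, PySem.Int.floordiv dy g) with
      | some m => if m = dx * dx + dy * dy then detected + 1 else detected
      | none => detected) 0

-- ===== PRECONDITION & SPEC =====
def Spec_detect_asteroids (asteroid_coords : List (Int × Int)) (from_base : Int × Int) (out : Int) : Prop := out = detect_asteroids_alt asteroid_coords from_base
instance (asteroid_coords : List (Int × Int)) (from_base : Int × Int) (out : Int) : Decidable (Spec_detect_asteroids asteroid_coords from_base out) := by unfold Spec_detect_asteroids; infer_instance

-- ===== CLAIM (what is proved, stated in full; the proofs are below) =====
def Claim_equal_detect_asteroids : Prop := ∀ (asteroid_coords : List (Int × Int)) (from_base : Int × Int), Dom_detect_asteroids asteroid_coords from_base → Spec_detect_asteroids asteroid_coords from_base (detect_asteroids asteroid_coords from_base)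

-- ===== LEMMAS AND PROOFS =====

-- proof-side abbreviations: squared distance and gcd-reduced direction of p as seen from a
def rSq (a p : Int × Int) : Int := (p.1 - a.1) * (p.1 - a.1) + (p.2 - a.2) * (p.2 - a.2)
def dirOf (a p : Int × Int) : Int × Int :=
  let g := pyGcd |p.1 - a.1| |p.2 - a.2|
  (PySem.Int.floordiv (p.1 - a.1) g, PySem.Int.floordiv (p.2 - a.2) g)


theorem pyGcd_eq_gcd' : ∀ (n : Nat) (a b : Int), b.natAbs = n → 0 ≤ a → 0 ≤ b → pyGcd a b = (Int.gcd a b : Int) := by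
  intro n
  induction n using Nat.strong_induction_on with
  | _ n ih =>
    intro a b hn ha hb
    rw [pyGcd]
    split
    · rename_i h; subst h; simp [Int.gcd, Int.natAbs_of_nonneg ha]
    · rename_i h
      have hbpos : 0 < b := lt_of_le_of_ne hb (Ne.symm h)
      rw [PySem.Int.mod_eq_emod_of_pos hbpos]
      have h1 : 0 ≤ a % b := Int.emod_nonneg a h
      have h2 : a % b < b := Int.emod_lt_of_pos a hbpos
      rw [ih (a % b).natAbs (by omega) b (a % b) rfl hb h1]
      rw [Int.gcd_comm b (a % b), Int.gcd_emod]

theorem pyGcd_eq_gcd (a b : Int) (ha : 0 ≤ a) (hb : 0 ≤ b) : pyGcd a b = (Int.gcd a b : Int) :=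
  pyGcd_eq_gcd' b.natAbs a b rfl ha hb

theorem dirOf_eq (a p : Int × Int) (hp : ¬(p.1 - a.1 = 0 ∧ p.2 - a.2 = 0)) :
    dirOf a p = ((p.1 - a.1) / (Int.gcd (p.1 - a.1) (p.2 - a.2) : Int),
                 (p.2 - a.2) / (Int.gcd (p.1 - a.1) (p.2 - a.2) : Int)) := by
  show (PySem.Int.floordiv (p.1 - a.1) (pyGcd |p.1 - a.1| |p.2 - a.2|),
      PySem.Int.floordiv (p.2 - a.2) (pyGcd |p.1 - a.1| |p.2 - a.2|)) = _
  have hge : pyGcd |p.1 - a.1| |p.2 - a.2| = (Int.gcd (p.1 - a.1) (p.2 - a.2) : Int) := by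
    rw [pyGcd_eq_gcd _ _ (abs_nonneg _) (abs_nonneg _)]
    norm_cast
    simp [Int.gcd, Int.natAbs_abs]
  have hg : 0 < (Int.gcd (p.1 - a.1) (p.2 - a.2) : Int) := by
    exact_mod_cast Int.gcd_pos_iff.mpr (by tauto)
  rw [hge, PySem.Int.floordiv_eq_ediv_of_pos hg, PySem.Int.floordiv_eq_ediv_of_pos hg]

theorem obscures_char (a p q : Int × Int) :
    obscures_asteroid a p q = true ↔
      ((q.2 - a.2) * (p.1 - a.1) - (q.1 - a.1) * (p.2 - a.2) = 0 ∧
       0 ≤ (q.1 - a.1) * (p.1 - a.1) + (q.2 - a.2) * (p.2 - a.2) ∧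
       (q.1 - a.1) * (p.1 - a.1) + (q.2 - a.2) * (p.2 - a.2) ≤
         (p.1 - a.1) * (p.1 - a.1) + (p.2 - a.2) * (p.2 - a.2)) := by
  show (if (q.2 - a.2) * (p.1 - a.1) - (q.1 - a.1) * (p.2 - a.2) ≠ 0 then false
       else if (q.1 - a.1) * (p.1 - a.1) + (q.2 - a.2) * (p.2 - a.2) < 0 then false
       else if (q.1 - a.1) * (p.1 - a.1) + (q.2 - a.2) * (p.2 - a.2) >
           (p.1 - a.1) * (p.1 - a.1) + (p.2 - a.2) * (p.2 - a.2) then false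
       else true) = true ↔ _
  split_ifs with h1 h2 h3 <;> simp_all

theorem prim_eq (ux uy sx sy : Int) (hu : Int.gcd ux uy = 1) (hs : Int.gcd sx sy = 1)
    (hcross : sy * ux = sx * uy) (hdot : 0 ≤ sx * ux + sy * uy) : sx = ux ∧ sy = uy := by
  have hcu : IsCoprime ux uy := Int.isCoprime_iff_gcd_eq_one.mpr hu
  have hcs : IsCoprime sx sy := Int.isCoprime_iff_gcd_eq_one.mpr hs
  have d1 : ux ∣ sx := hcu.dvd_of_dvd_mul_right ⟨sy, by linarith [hcross]⟩
  have d2 : sx ∣ ux := hcs.dvd_of_dvd_mul_right ⟨uy, by linarith [hcross]⟩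
  have d3 : uy ∣ sy := (hcu.symm).dvd_of_dvd_mul_right ⟨sx, by linarith [hcross]⟩
  have d4 : sy ∣ uy := (hcs.symm).dvd_of_dvd_mul_right ⟨ux, by linarith [hcross]⟩
  have ex : sx = ux ∨ sx = -ux := by
    have := Nat.dvd_antisymm (Int.natAbs_dvd_natAbs.mpr d2) (Int.natAbs_dvd_natAbs.mpr d1)
    omega
  have ey : sy = uy ∨ sy = -uy := by
    have := Nat.dvd_antisymm (Int.natAbs_dvd_natAbs.mpr d4) (Int.natAbs_dvd_natAbs.mpr d3)
    omega
  rcases ex with h1 | h1 <;> rcases ey with h2 | h2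
  · exact ⟨h1, h2⟩
  · rw [h1, h2] at hcross
    have h3 : ux * uy = 0 := by linarith [hcross, mul_comm ux uy, mul_comm uy ux]
    rcases mul_eq_zero.mp h3 with h | h
    · have hn : uy.natAbs = 1 := by rw [h] at hu; simpa [Int.gcd] using hu
      have : uy = 1 ∨ uy = -1 := by omega
      exfalso; rcases this with h4 | h4 <;> rw [h1, h2, h, h4] at hdot <;> norm_num at hdot
    · exact ⟨h1, by omega⟩
  · rw [h1, h2] at hcross
    have h3 : ux * uy = 0 := by linarith [hcross, mul_comm ux uy, mul_comm uy ux]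
    rcases mul_eq_zero.mp h3 with h | h
    · exact ⟨by omega, h2⟩
    · have hn : ux.natAbs = 1 := by rw [h] at hu; simpa [Int.gcd] using hu
      have : ux = 1 ∨ ux = -1 := by omega
      exfalso; rcases this with h4 | h4 <;> rw [h1, h2, h, h4] at hdot <;> norm_num at hdot
  · rw [h1, h2] at hdot
    have z1 : ux = 0 := mul_self_eq_zero.mp (by nlinarith [mul_self_nonneg ux, mul_self_nonneg uy])
    have z2 : uy = 0 := mul_self_eq_zero.mp (by nlinarith [mul_self_nonneg ux, mul_self_nonneg uy])
    exfalso; rw [z1, z2] at hu; simp [Int.gcd] at hu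

theorem vec_decomp (vx vy : Int) (hv : ¬(vx = 0 ∧ vy = 0)) :
    0 < (Int.gcd vx vy : Int) ∧
    vx = (Int.gcd vx vy : Int) * (vx / (Int.gcd vx vy : Int)) ∧
    vy = (Int.gcd vx vy : Int) * (vy / (Int.gcd vx vy : Int)) ∧
    Int.gcd (vx / (Int.gcd vx vy : Int)) (vy / (Int.gcd vx vy : Int)) = 1 := by
  have hg : 0 < Int.gcd vx vy := Int.gcd_pos_iff.mpr (by tauto)
  refine ⟨by exact_mod_cast hg, (Int.mul_ediv_cancel' (Int.gcd_dvd_left vx vy)).symm,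
    (Int.mul_ediv_cancel' (Int.gcd_dvd_right vx vy)).symm, Int.gcd_div_gcd_div_gcd hg⟩

theorem dir_eq_iff (vx vy wx wy : Int) (hv : ¬(vx = 0 ∧ vy = 0)) (hw : ¬(wx = 0 ∧ wy = 0)) :
    (wx / (Int.gcd wx wy : Int), wy / (Int.gcd wx wy : Int)) = (vx / (Int.gcd vx vy : Int), vy / (Int.gcd vx vy : Int)) ↔
      (wy * vx - wx * vy = 0 ∧ 0 ≤ wx * vx + wy * vy) := by
  obtain ⟨hg, hvx, hvy, hcop⟩ := vec_decomp vx vy hv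
  obtain ⟨hh, hwx, hwy, hcops⟩ := vec_decomp wx wy hw
  set g : Int := (Int.gcd vx vy : Int)
  set h : Int := (Int.gcd wx wy : Int)
  set ux := vx / g; set uy := vy / g; set sx := wx / h; set sy := wy / h
  constructor
  · intro he
    have e1 : sx = ux := congrArg Prod.fst he
    have e2 : sy = uy := congrArg Prod.snd he
    constructor
    · rw [hvx, hvy, hwx, hwy, e1, e2]; ring
    · rw [hvx, hvy, hwx, hwy, e1, e2]
      have he : h * ux * (g * ux) + h * uy * (g * uy) = (h * g) * (ux * ux + uy * uy) := by ring
      rw [he]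
      exact mul_nonneg (le_of_lt (mul_pos hh hg)) (by nlinarith [mul_self_nonneg ux, mul_self_nonneg uy])
  · rintro ⟨hcross, hdot⟩
    rw [hvx, hvy, hwx, hwy] at hcross hdot
    have hcross' : sy * ux = sx * uy := by
      have h1 : (h * g) * (sy * ux - sx * uy) = 0 := by linear_combination hcross
      have h2 : sy * ux - sx * uy = 0 :=
        (mul_eq_zero.mp h1).resolve_left (ne_of_gt (mul_pos hh hg))
      linarith [h2]
    have hdot' : 0 ≤ sx * ux + sy * uy := by
      by_contra hn
      push Not at hn
      have he : h * sx * (g * ux) + h * sy * (g * uy) = (h * g) * (sx * ux + sy * uy) := by ring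
      rw [he] at hdot
      linarith [mul_neg_of_pos_of_neg (mul_pos hh hg) hn]
    obtain ⟨e1, e2⟩ := prim_eq ux uy sx sy hcop hcops hcross' hdot'
    rw [e1, e2]

theorem dist_iff (vx vy wx wy : Int) (hv : ¬(vx = 0 ∧ vy = 0)) (hw : ¬(wx = 0 ∧ wy = 0))
    (heq : (wx / (Int.gcd wx wy : Int), wy / (Int.gcd wx wy : Int)) = (vx / (Int.gcd vx vy : Int), vy / (Int.gcd vx vy : Int)))
    (hne : (wx, wy) ≠ (vx, vy)) :
    (wx * vx + wy * vy ≤ vx * vx + vy * vy) ↔ (wx * wx + wy * wy < vx * vx + vy * vy) := by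
  obtain ⟨hg, hvx, hvy, hcop⟩ := vec_decomp vx vy hv
  obtain ⟨hh, hwx, hwy, _⟩ := vec_decomp wx wy hw
  set g : Int := (Int.gcd vx vy : Int)
  set h : Int := (Int.gcd wx wy : Int)
  set ux := vx / g; set uy := vy / g; set sx := wx / h; set sy := wy / h
  have e1 : sx = ux := congrArg Prod.fst heq
  have e2 : sy = uy := congrArg Prod.snd heq
  rw [e1] at hwx; rw [e2] at hwy
  set N := ux * ux + uy * uy with hNdef
  have hN : 0 < N := by
    rcases not_and_or.mp hv with h0 | h0
    · have : ux ≠ 0 := fun hz => h0 (by rw [hvx, hz, mul_zero])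
      nlinarith [mul_self_pos.mpr this, mul_self_nonneg uy]
    · have : uy ≠ 0 := fun hz => h0 (by rw [hvy, hz, mul_zero])
      nlinarith [mul_self_pos.mpr this, mul_self_nonneg ux]
  have hne' : h ≠ g := by
    intro hc
    exact hne (by rw [hwx, hwy, hvx, hvy, hc])
  have L1 : wx * vx + wy * vy = (h * g) * N := by rw [hvx, hvy, hwx, hwy]; ring
  have L2 : vx * vx + vy * vy = (g * g) * N := by rw [hvx, hvy]; ring
  have L3 : wx * wx + wy * wy = (h * h) * N := by rw [hwx, hwy]; ring
  rw [L1, L2, L3]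
  constructor
  · intro hle
    have s1 : h * g ≤ g * g := le_of_mul_le_mul_right hle hN
    have s2 : h ≤ g := le_of_mul_le_mul_right s1 hg
    have s3 : h < g := lt_of_le_of_ne s2 hne'
    exact mul_lt_mul_of_pos_right (mul_self_lt_mul_self (le_of_lt hh) s3) hN
  · intro hlt0
    have s1 : h * h < g * g := lt_of_mul_lt_mul_right hlt0 (le_of_lt hN)
    have s2 : h < g := by nlinarith [hh, hg]
    exact mul_le_mul_of_nonneg_right (by nlinarith [hg, hh] : h * g ≤ g * g) (le_of_lt hN)

theorem obscures_iff (a p q : Int × Int) (hp : p ≠ a) (hq : q ≠ a) (hqp : q ≠ p) :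
    obscures_asteroid a p q = true ↔ (dirOf a q = dirOf a p ∧ rSq a q < rSq a p) := by
  have hv : ¬(p.1 - a.1 = 0 ∧ p.2 - a.2 = 0) := by
    intro ⟨h1, h2⟩; exact hp (Prod.ext_iff.mpr ⟨by omega, by omega⟩)
  have hw : ¬(q.1 - a.1 = 0 ∧ q.2 - a.2 = 0) := by
    intro ⟨h1, h2⟩; exact hq (Prod.ext_iff.mpr ⟨by omega, by omega⟩)
  have hne : (q.1 - a.1, q.2 - a.2) ≠ (p.1 - a.1, p.2 - a.2) := by
    intro hc
    obtain ⟨h1, h2⟩ := Prod.ext_iff.mp hc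
    exact hqp (Prod.ext_iff.mpr ⟨by omega, by omega⟩)
  rw [obscures_char, dirOf_eq a p hv, dirOf_eq a q hw]
  have hdir := dir_eq_iff (p.1 - a.1) (p.2 - a.2) (q.1 - a.1) (q.2 - a.2) hv hw
  constructor
  · rintro ⟨hc, hd, hl⟩
    have he := hdir.mpr ⟨hc, hd⟩
    have he' : ((q.1 - a.1) / (Int.gcd (q.1 - a.1) (q.2 - a.2) : Int), (q.2 - a.2) / (Int.gcd (q.1 - a.1) (q.2 - a.2) : Int)) = ((p.1 - a.1) / (Int.gcd (p.1 - a.1) (p.2 - a.2) : Int), (p.2 - a.2) / (Int.gcd (p.1 - a.1) (p.2 - a.2) : Int)) := he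
    refine ⟨by rw [Prod.ext_iff] at he' ⊢; exact he', ?_⟩
    have := (dist_iff _ _ _ _ hv hw he' hne).mp hl
    simpa [rSq] using this
  · rintro ⟨he, hr⟩
    have he' : ((q.1 - a.1) / (Int.gcd (q.1 - a.1) (q.2 - a.2) : Int), (q.2 - a.2) / (Int.gcd (q.1 - a.1) (q.2 - a.2) : Int)) = ((p.1 - a.1) / (Int.gcd (p.1 - a.1) (p.2 - a.2) : Int), (p.2 - a.2) / (Int.gcd (p.1 - a.1) (p.2 - a.2) : Int)) := by
      rw [Prod.ext_iff] at he ⊢; exact he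
    obtain ⟨hc, hd⟩ := hdir.mp he'
    refine ⟨hc, hd, ?_⟩
    exact (dist_iff _ _ _ _ hv hw he' hne).mpr (by simpa [rSq] using hr)

def mstep (o : Option Int) (r : Int) : Option Int :=
  match o with
  | none => some r
  | some m => some (min m r)

theorem bestStep_eq (a : Int × Int) (D : PySem.Dict (Int × Int) Int) (q : Int × Int) (d : Int × Int) :
    (bestStep a D q).get? d =
      if ¬(q.1 - a.1 = 0 ∧ q.2 - a.2 = 0) ∧ dirOf a q = d then mstep (D.get? d) (rSq a q)
      else D.get? d := by
  show (if q.1 - a.1 = 0 ∧ q.2 - a.2 = 0 then D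
      else match D.get? (dirOf a q) with
        | none => D.insert (dirOf a q) (rSq a q)
        | some m => if rSq a q < m then D.insert (dirOf a q) (rSq a q) else D).get? d = _
  by_cases h1 : q.1 - a.1 = 0 ∧ q.2 - a.2 = 0
  · rw [if_pos h1, if_neg (by tauto)]
  · rw [if_neg h1]
    by_cases h2 : dirOf a q = d
    · rw [if_pos (And.intro h1 h2), h2]
      cases hD : D.get? d with
      | none =>
        show (D.insert d (rSq a q)).get? d = mstep none (rSq a q)
        rw [PySem.Dict.get?_insert_self]
        rfl
      | some m =>
        show (if rSq a q < m then D.insert d (rSq a q) else D).get? d = mstep (some m) (rSq a q)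
        by_cases h3 : rSq a q < m
        · rw [if_pos h3, PySem.Dict.get?_insert_self]
          show _ = some (min m (rSq a q))
          rw [min_eq_right (le_of_lt h3)]
        · rw [if_neg h3, hD]
          show _ = some (min m (rSq a q))
          rw [min_eq_left (by omega)]
    · rw [if_neg (fun hc => h2 hc.2)]
      cases hD : D.get? (dirOf a q) with
      | none => exact PySem.Dict.get?_insert_of_ne _ _ (fun hc => h2 hc.symm)
      | some m =>
        show (if rSq a q < m then D.insert (dirOf a q) (rSq a q) else D).get? d = D.get? d
        by_cases h3 : rSq a q < m
        · rw [if_pos h3]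
          exact PySem.Dict.get?_insert_of_ne _ _ (fun hc => h2 hc.symm)
        · rw [if_neg h3]

theorem get?_foldl_best (a : Int × Int) (d : Int × Int) :
    ∀ (l : List (Int × Int)) (D : PySem.Dict (Int × Int) Int),
      (l.foldl (bestStep a) D).get? d =
        ((l.filter (fun q => decide (¬(q.1 - a.1 = 0 ∧ q.2 - a.2 = 0) ∧ dirOf a q = d))).map (rSq a)).foldl
          mstep (D.get? d) := by
  intro l
  induction l with
  | nil => intro D; rfl
  | cons q l ih =>
    intro D
    rw [List.foldl_cons, ih (bestStep a D q), bestStep_eq a D q d, List.filter_cons]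
    by_cases h : ¬(q.1 - a.1 = 0 ∧ q.2 - a.2 = 0) ∧ dirOf a q = d
    · rw [if_pos h, if_pos (decide_eq_true h), List.map_cons, List.foldl_cons]
    · rw [if_neg h, if_neg (show ¬(decide (¬(q.1 - a.1 = 0 ∧ q.2 - a.2 = 0) ∧ dirOf a q = d) = true) from by
        intro hc
        exact h (of_decide_eq_true hc))]

theorem foldl_mstep_some (rs : List Int) : ∀ (c : Int), rs.foldl mstep (some c) = some (rs.foldl min c) := by
  induction rs with
  | nil => intro c; rfl
  | cons r rs ih => intro c; rw [List.foldl_cons, List.foldl_cons]; exact ih (min c r)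

theorem foldl_min_le (rs : List Int) : ∀ (c : Int), rs.foldl min c ≤ c ∧ ∀ r ∈ rs, rs.foldl min c ≤ r := by
  induction rs with
  | nil => intro c; exact ⟨le_refl c, by simp⟩
  | cons r rs ih =>
    intro c
    obtain ⟨h1, h2⟩ := ih (min c r)
    refine ⟨le_trans h1 (min_le_left c r), ?_⟩
    intro x hx
    rcases List.mem_cons.mp hx with rfl | hx
    · exact le_trans h1 (min_le_right c x)
    · exact h2 x hx

theorem foldl_min_mem (rs : List Int) : ∀ (c : Int), rs.foldl min c = c ∨ rs.foldl min c ∈ rs := by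
  induction rs with
  | nil => intro c; exact Or.inl rfl
  | cons r rs ih =>
    intro c
    rcases ih (min c r) with h | h
    · rw [List.foldl_cons, h]
      rcases min_choice c r with h2 | h2
      · exact Or.inl h2
      · exact Or.inr (by rw [h2]; exact List.mem_cons_self)
    · exact Or.inr (List.mem_cons_of_mem r h)

theorem ne_iff_sub (x y : Int × Int) : x ≠ y ↔ ¬(x.1 - y.1 = 0 ∧ x.2 - y.2 = 0) := by
  rw [Ne, Prod.ext_iff]
  omega

theorem can_see_iff (a p : Int × Int) (l : List (Int × Int)) :
    can_see_asteroid a p l = true ↔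
      ∀ q ∈ l, q ≠ a → q ≠ p → ¬(obscures_asteroid a p q = true) := by
  rw [can_see_asteroid, List.all_eq_true]
  constructor
  · intro h q hq hqa hqp hobs
    have := h q hq
    rw [if_neg (by tauto)] at this
    rw [hobs] at this
    simp at this
  · intro h q hq
    by_cases hc : q = a ∨ q = p
    · rw [if_pos hc]
    · rw [if_neg hc]
      push Not at hc
      have := h q hq hc.1 hc.2
      simp [this]

theorem detect_eq (l : List (Int × Int)) (a : Int × Int) :
    detect_asteroids l a = detect_asteroids_alt l a := by
  have e1 : detect_asteroids l a = l.foldl (fun detected asteroid =>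
      if asteroid = a then detected
      else if can_see_asteroid a asteroid l then detected + 1
      else detected) 0 := rfl
  have e2 : detect_asteroids_alt l a = l.foldl (fun detected p =>
      if p.1 - a.1 = 0 ∧ p.2 - a.2 = 0 then detected
      else
        match (l.foldl (bestStep a) PySem.Dict.empty).get?
            (PySem.Int.floordiv (p.1 - a.1) (pyGcd |p.1 - a.1| |p.2 - a.2|),
             PySem.Int.floordiv (p.2 - a.2) (pyGcd |p.1 - a.1| |p.2 - a.2|)) with
        | some m => if m = (p.1 - a.1) * (p.1 - a.1) + (p.2 - a.2) * (p.2 - a.2) then detected + 1 else detected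
        | none => detected) 0 := rfl
  rw [e1, e2]
  apply PySem.List.foldl_congr_mem
  intro det p hp
  by_cases hpa : p = a
  · rw [if_pos hpa, if_pos (by rw [hpa]; exact ⟨sub_self a.1, sub_self a.2⟩)]
  · have hpv : ¬(p.1 - a.1 = 0 ∧ p.2 - a.2 = 0) := (ne_iff_sub p a).mp hpa
    rw [if_neg hpa, if_neg hpv]
    have hbest := get?_foldl_best a (dirOf a p) l PySem.Dict.empty
    set rs := ((l.filter (fun q => decide (¬(q.1 - a.1 = 0 ∧ q.2 - a.2 = 0) ∧ dirOf a q = dirOf a p))).map (rSq a)) with hrsdef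
    have hmem : rSq a p ∈ rs := by
      rw [hrsdef]
      exact List.mem_map_of_mem (List.mem_filter.mpr ⟨hp, decide_eq_true ⟨hpv, rfl⟩⟩)
    have hrs_iff : ∀ r, r ∈ rs ↔ ∃ q ∈ l, q ≠ a ∧ dirOf a q = dirOf a p ∧ rSq a q = r := by
      intro r
      rw [hrsdef, List.mem_map]
      constructor
      · rintro ⟨q, hqf, hqr⟩
        obtain ⟨hql, hqp⟩ := List.mem_filter.mp hqf
        obtain ⟨h1, h2⟩ := of_decide_eq_true hqp
        exact ⟨q, hql, (ne_iff_sub q a).mpr h1, h2, hqr⟩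
      · rintro ⟨q, hql, hqa, hqd, hqr⟩
        exact ⟨q, List.mem_filter.mpr ⟨hql, decide_eq_true ⟨(ne_iff_sub q a).mp hqa, hqd⟩⟩, hqr⟩
    cases hrs : rs with
    | nil => rw [hrs] at hmem; simp at hmem
    | cons r0 rest =>
      rw [hrs] at hbest
      rw [List.foldl_cons] at hbest
      have hbest2 : (l.foldl (bestStep a) PySem.Dict.empty).get? (dirOf a p) = some (rest.foldl min r0) := by
        rw [hbest]
        exact foldl_mstep_some rest r0
      set M := rest.foldl min r0 with hMdef
      have hMle : ∀ r ∈ rs, M ≤ r := by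
        intro r hr
        rw [hrs] at hr
        obtain ⟨h1, h2⟩ := foldl_min_le rest r0
        rcases List.mem_cons.mp hr with rfl | hr
        · exact h1
        · exact h2 r hr
      have hMmem : M ∈ rs := by
        rw [hrs]
        rcases foldl_min_mem rest r0 with h | h
        · rw [hMdef, h]; exact List.mem_cons_self
        · exact List.mem_cons_of_mem r0 h
      have hkey : (PySem.Int.floordiv (p.1 - a.1) (pyGcd |p.1 - a.1| |p.2 - a.2|),
             PySem.Int.floordiv (p.2 - a.2) (pyGcd |p.1 - a.1| |p.2 - a.2|)) = dirOf a p := rfl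
      rw [hkey, hbest2]
      show (if can_see_asteroid a p l = true then det + 1 else det) =
        (if M = rSq a p then det + 1 else det)
      have hiff : can_see_asteroid a p l = true ↔ M = rSq a p := by
        rw [can_see_iff]
        constructor
        · intro h
          obtain ⟨q0, hq0l, hq0a, hq0d, hq0r⟩ := (hrs_iff M).mp hMmem
          have hle : M ≤ rSq a p := hMle _ hmem
          by_cases hq0p : q0 = p
          · rw [← hq0r, hq0p]
          · have hnobs := h q0 hq0l hq0a hq0p
            rw [obscures_iff a p q0 hpa hq0a hq0p] at hnobs
            push Not at hnobs
            have := hnobs hq0d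
            omega
        · intro hM q hql hqa hqp hobs
          rw [obscures_iff a p q hpa hqa hqp] at hobs
          obtain ⟨hqd, hqr⟩ := hobs
          have := hMle (rSq a q) ((hrs_iff _).mpr ⟨q, hql, hqa, hqd, rfl⟩)
          omega
      by_cases hsee : can_see_asteroid a p l = true
      · rw [if_pos hsee, if_pos (hiff.mp hsee)]
      · rw [if_neg hsee, if_neg (fun hc => hsee (hiff.mpr hc))]

-- ===== VERDICT (by name: the statement is the Claim_ definition above) =====
theorem detect_asteroids_spec : Claim_equal_detect_asteroids := by
  unfold Claim_equal_detect_asteroids Spec_detect_asteroids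
  intro asteroid_coords from_base _
  exact detect_eq asteroid_coords from_base
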